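-- pv_equiv track=rewrite | github.com/ValerioBelcamino/pdiddyelle | partial_plan_progressor.py | _extract_plan_prefix
-- ===== SOURCE A (Python) =====
-- def _extract_plan_prefix(plan_text: str, instruction_count: int) -> str:
--     if instruction_count <= 0 or not plan_text:
--         return ""
--     collected = []
--     seen = 0
--     for line in plan_text.splitlines(keepends=True):
--         collected.append(line)
--         if ":" in line:
--             seen += 1
--             if seen == instruction_count:
--                 break
--     return "".join(collected)
-- ===== SOURCE B (Python) =====
-- def _extract_plan_prefix(plan_text: str, instruction_count: int) -> str:
--     if instruction_count <= 0 or not plan_text: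
--         return ""
--     lines = plan_text.splitlines(keepends=True)
--     colon_idx = [i for i, line in enumerate(lines) if ":" in line]
--     if instruction_count > len(colon_idx):
--         return plan_text
--     return "".join(lines[: colon_idx[instruction_count - 1] + 1])
-- ===== Notes on version B (the rewrite author's own statement) =====
-- stated objective: alternative
-- what changed: Replaces A's accumulate-and-early-break running-counter loop with an index-then-slice decomposition: split once, precompute the list of colon-line indices, then either return the whole text unchanged or slice up to the Nth colon index and join.
import Mathlib
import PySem

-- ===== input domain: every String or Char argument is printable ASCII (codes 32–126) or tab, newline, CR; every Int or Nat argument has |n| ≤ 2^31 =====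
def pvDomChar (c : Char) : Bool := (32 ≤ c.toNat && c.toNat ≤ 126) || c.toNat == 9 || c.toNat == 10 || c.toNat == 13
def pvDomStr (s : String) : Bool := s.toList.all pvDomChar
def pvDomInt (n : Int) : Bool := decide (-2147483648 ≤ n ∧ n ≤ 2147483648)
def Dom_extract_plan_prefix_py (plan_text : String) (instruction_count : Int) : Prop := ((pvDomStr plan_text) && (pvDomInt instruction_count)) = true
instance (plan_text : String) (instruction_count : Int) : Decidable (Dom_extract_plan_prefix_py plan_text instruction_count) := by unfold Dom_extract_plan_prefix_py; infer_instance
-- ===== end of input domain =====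

-- B replaces A's accumulate-and-early-break counter loop by an index-then-slice
-- decomposition (precomputed colon-line indices, whole text returned unchanged when
-- there are fewer than N colon lines); no speed claim.

-- shared port of the builtin str.splitlines(keepends=True): exact on the task's
-- ASCII domain, where the only line breaks are '\n', '\r' and '\r\n'
def pySplitlinesKeep (cur : List Char) : List Char → List (List Char)
  | [] => if cur = [] then [] else [cur.reverse]
  | '\r' :: '\n' :: rest => (cur.reverse ++ ['\r', '\n']) :: pySplitlinesKeep [] rest
  | c :: rest =>
    if c = '\n' || c = '\r' then (cur.reverse ++ [c]) :: pySplitlinesKeep [] rest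
    else pySplitlinesKeep (c :: cur) rest

-- ===== PORT A =====
-- A's for-loop with `collected`, running counter `seen` and early break
def loopA (ic : Int) : List (List Char) → List (List Char) → Int → List (List Char)
  | [], coll, _ => coll
  | l :: rest, coll, seen =>
      let coll' := coll ++ [l]
      if PySem.Chars.isIn [':'] l then
        if seen + 1 = ic then coll'
        else loopA ic rest coll' (seen + 1)
      else loopA ic rest coll' seen

def extract_plan_prefix_py (plan_text : String) (instruction_count : Int) : String :=
  if instruction_count ≤ 0 || plan_text = "" then ""
  else
    String.ofList (loopA instruction_count (pySplitlinesKeep [] plan_text.toList) [] 0).flatten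

-- ===== PORT B =====
def extract_plan_prefix_py_alt (plan_text : String) (instruction_count : Int) : String :=
  if instruction_count ≤ 0 || plan_text = "" then ""
  else
    let lines := pySplitlinesKeep [] plan_text.toList
    let colon_idx := ((PySem.List.enumerate lines 0).filter
        (fun p => PySem.Chars.isIn [':'] p.2)).map (·.1)
    if (colon_idx.length : Int) < instruction_count then plan_text
    else
      -- colon_idx[instruction_count - 1] is in range thanks to the guard above
      -- (Python would raise IndexError otherwise; `.elim ""` is the unreachable none case)
      (PySem.List.pyGet? colon_idx (instruction_count - 1)).elim ""
        (fun k => String.ofList (PySem.List.slice lines none (some (k + 1))).flatten)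

-- ===== PRECONDITION & SPEC =====
def Spec_extract_plan_prefix_py (plan_text : String) (instruction_count : Int) (out : String) : Prop := out = extract_plan_prefix_py_alt plan_text instruction_count
instance (plan_text : String) (instruction_count : Int) (out : String) : Decidable (Spec_extract_plan_prefix_py plan_text instruction_count out) := by unfold Spec_extract_plan_prefix_py; infer_instance

-- ===== CLAIM (what is proved, stated in full; the proofs are below) =====
def Claim_equal_extract_plan_prefix_py : Prop := ∀ (plan_text : String) (instruction_count : Int), Dom_extract_plan_prefix_py plan_text instruction_count → Spec_extract_plan_prefix_py plan_text instruction_count (extract_plan_prefix_py plan_text instruction_count)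

-- ===== LEMMAS AND PROOFS =====

-- proof-only reference function: the prefix of `lines` up to and including the n-th colon line
def bTakeN : Nat → List (List Char) → List (List Char)
  | _, [] => []
  | n, l :: rest =>
      l :: (if PySem.Chars.isIn [':'] l then (if n = 1 then [] else bTakeN (n - 1) rest)
            else bTakeN n rest)

theorem flatten_pySplitlinesKeep (cur cs : List Char) :
    (pySplitlinesKeep cur cs).flatten = cur.reverse ++ cs := by
  fun_induction pySplitlinesKeep cur cs <;> simp_all

theorem loopA_eq (ic : Int) (lines : List (List Char)) :
    ∀ coll seen, seen < ic →
      loopA ic lines coll seen = coll ++ bTakeN (ic - seen).toNat lines := by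
  induction lines with
  | nil => intro coll seen _; simp [loopA, bTakeN]
  | cons l rest ih =>
    intro coll seen h
    simp only [loopA, bTakeN]
    by_cases hc : PySem.Chars.isIn [':'] l = true
    · by_cases he : seen + 1 = ic
      · have h1 : (ic - seen).toNat = 1 := by omega
        simp [hc, he, h1]
      · have h1 : (ic - seen).toNat ≠ 1 := by omega
        have h2 : (ic - seen).toNat - 1 = (ic - (seen + 1)).toNat := by omega
        simp [hc, he, h1, h2, ih (coll ++ [l]) (seen + 1) (by omega)]
    · simp [hc, ih (coll ++ [l]) seen h]

-- the colon-index list B builds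
def cI (lines : List (List Char)) : List Int :=
  ((PySem.List.enumerate lines 0).filter (fun p => PySem.Chars.isIn [':'] p.2)).map (·.1)

theorem enum_shift {α : Type} (xs : List α) (s t : Int) :
    PySem.List.enumerate xs (s + t) = (PySem.List.enumerate xs s).map (fun p => (p.1 + t, p.2)) := by
  induction xs generalizing s with
  | nil => simp [PySem.List.enumerate_nil]
  | cons x xs ih =>
    rw [PySem.List.enumerate_cons, PySem.List.enumerate_cons, List.map_cons,
      show s + t + 1 = (s + 1) + t from by ring, ih]

theorem cI_cons (l : List Char) (rest : List (List Char)) :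
    cI (l :: rest) =
      (if PySem.Chars.isIn [':'] l then [(0 : Int)] else []) ++ (cI rest).map (· + 1) := by
  have he : PySem.List.enumerate rest 1 = (PySem.List.enumerate rest 0).map (fun p => (p.1 + 1, p.2)) := by
    simpa using enum_shift rest 0 1
  simp only [cI, PySem.List.enumerate_cons, he]
  by_cases hc : PySem.Chars.isIn [':'] l = true <;>
    simp [hc, he, List.filter_map, List.map_map, Function.comp] <;> rfl

theorem length_cI (lines : List (List Char)) :
    (cI lines).length = lines.countP (fun l => PySem.Chars.isIn [':'] l) := by
  induction lines with
  | nil => simp [cI]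
  | cons l rest ih =>
    rw [cI_cons]
    by_cases hc : PySem.Chars.isIn [':'] l = true <;> simp [hc, List.countP_cons, ih]

theorem bTakeN_all (lines : List (List Char)) :
    ∀ n : Nat, lines.countP (fun l => PySem.Chars.isIn [':'] l) < n → bTakeN n lines = lines := by
  induction lines with
  | nil => intro n _; simp [bTakeN]
  | cons l rest ih =>
    intro n h
    rw [List.countP_cons] at h
    simp only [bTakeN]
    by_cases hc : PySem.Chars.isIn [':'] l = true
    · have h1 : n ≠ 1 := by simp [hc] at h; omega
      simp [hc, h1, ih (n - 1) (by simp [hc] at h; omega)]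
    · simp [hc] at h ⊢; exact ih n (by omega)

theorem cI_get (lines : List (List Char)) :
    ∀ j : Nat, j < lines.countP (fun l => PySem.Chars.isIn [':'] l) →
      ∃ k : Nat, (cI lines)[j]? = some (k : Int) ∧ lines.take (k + 1) = bTakeN (j + 1) lines := by
  induction lines with
  | nil => intro j h; simp at h
  | cons l rest ih =>
    intro j h
    rw [List.countP_cons] at h
    rw [cI_cons]
    by_cases hc : PySem.Chars.isIn [':'] l = true
    · cases j with
      | zero => exact ⟨0, by simp [hc], by simp [bTakeN, hc]⟩
      | succ j' =>
        obtain ⟨k, hk, ht⟩ := ih j' (by simp [hc] at h; omega)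
        refine ⟨k + 1, ?_, ?_⟩
        · simp [hc, hk]
        · simp [bTakeN, hc, List.take_succ_cons] at ht ⊢; exact ht
    · obtain ⟨k, hk, ht⟩ := ih j (by simp [hc] at h; omega)
      refine ⟨k + 1, ?_, ?_⟩
      · simp [hc, hk]
      · simp [bTakeN, hc, List.take_succ_cons] at ht ⊢; exact ht

-- ===== VERDICT (by name: the statement is the Claim_ definition above) =====
theorem extract_plan_prefix_py_spec : Claim_equal_extract_plan_prefix_py := by
  intro plan_text ic _
  unfold Spec_extract_plan_prefix_py extract_plan_prefix_py extract_plan_prefix_py_alt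
  by_cases hg : (ic ≤ 0 || plan_text = "") = true
  · simp [hg]
  · simp only [hg, Bool.false_eq_true, if_false]
    have hpos : 1 ≤ ic := by
      simp only [Bool.or_eq_true, decide_eq_true_eq] at hg; omega
    set lines := pySplitlinesKeep [] plan_text.toList with hlines
    have hA : loopA ic lines [] 0 = bTakeN ic.toNat lines := by
      have := loopA_eq ic lines [] 0 (by omega)
      simpa using this
    have hcnt : (((PySem.List.enumerate lines 0).filter
        (fun p => PySem.Chars.isIn [':'] p.2)).map (·.1)).length
        = lines.countP (fun l => PySem.Chars.isIn [':'] l) := length_cI lines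
    rw [hcnt, hA]
    by_cases hfew : ((lines.countP (fun l => PySem.Chars.isIn [':'] l) : Nat) : Int) < ic
    · -- fewer colon lines than requested: A keeps everything, B returns the text
      rw [if_pos hfew, bTakeN_all lines ic.toNat (by omega),
        show lines.flatten = plan_text.toList from by
          simpa using flatten_pySplitlinesKeep [] plan_text.toList]
      simp
    · obtain ⟨k, hk, ht⟩ := cI_get lines (ic - 1).toNat (by omega)
      have hj : ((ic - 1).toNat : Int) = ic - 1 := by omega
      have hget : PySem.List.pyGet? (((PySem.List.enumerate lines 0).filter
          (fun p => PySem.Chars.isIn [':'] p.2)).map (·.1)) (ic - 1) = some (k : Int) := by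
        rw [← hj, PySem.List.pyGet?_natCast]; exact hk
      have hsl : PySem.List.slice lines none (some ((k : Int) + 1)) = lines.take (k + 1) := by
        rw [show ((k : Int) + 1) = ((k + 1 : Nat) : Int) from by push_cast; ring,
          PySem.List.slice_to_natCast]
      have hic : (ic - 1).toNat + 1 = ic.toNat := by omega
      rw [if_neg hfew, hget]
      simp only [Option.elim]
      rw [hsl, ht, hic]
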